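-- pv_equiv track=rewrite | github.com/ad-astra-per-ardua/Solving-Algorithm | Deepcoding.org/greedy.py | solve
-- ===== SOURCE A (Python) =====
-- def solve(Anum, Lnum):
--     cowNum = 0
--     cknNum = Anum
--
--     while Lnum > cknNum * 2:
--         cowNum += 1
--         cknNum -= 1
--         Lnum -= 4
--
--     return cowNum, cknNum
-- ===== SOURCE B (Python) =====
-- def solve(Anum, Lnum):
--     k = max(0, (Lnum - 2 * Anum + 1) // 2)
--     return k, Anum - k
-- ===== Notes on version B (the rewrite author's own statement) =====
-- stated objective: faster
-- what changed: Replaces the count-down while loop with a closed form: the iteration count k = max(0, ceil((Lnum-2*Anum)/2)) is computed once and (k, Anum-k) returned directly.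
import Mathlib
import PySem

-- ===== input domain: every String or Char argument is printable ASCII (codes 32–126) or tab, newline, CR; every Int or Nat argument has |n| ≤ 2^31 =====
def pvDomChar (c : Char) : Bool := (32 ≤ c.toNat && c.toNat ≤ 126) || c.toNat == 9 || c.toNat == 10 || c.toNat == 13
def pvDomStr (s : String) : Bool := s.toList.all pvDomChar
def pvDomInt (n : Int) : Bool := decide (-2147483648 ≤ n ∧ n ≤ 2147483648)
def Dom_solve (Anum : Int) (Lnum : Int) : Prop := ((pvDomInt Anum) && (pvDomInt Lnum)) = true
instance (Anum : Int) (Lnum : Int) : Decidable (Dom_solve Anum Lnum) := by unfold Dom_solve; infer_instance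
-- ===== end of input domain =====

-- B replaces A's count-down while loop with an O(1) closed form: k = max(0, (Lnum-2*Anum+1)//2), returning (k, Anum-k).


-- ===== PORT A =====
-- the while loop of A: state (cowNum, cknNum, Lnum)
def solveLoop (cowNum cknNum Lnum : Int) : Int × Int :=
  if Lnum > cknNum * 2 then
    solveLoop (cowNum + 1) (cknNum - 1) (Lnum - 4)
  else
    (cowNum, cknNum)
termination_by (Lnum - 2 * cknNum).toNat
decreasing_by omega

def solve (Anum : Int) (Lnum : Int) : Int × Int := solveLoop 0 Anum Lnum

-- ===== PORT B =====
def solve_alt (Anum : Int) (Lnum : Int) : Int × Int :=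
  let k := max 0 (PySem.Int.floordiv (Lnum - 2 * Anum + 1) 2)
  (k, Anum - k)

-- ===== PRECONDITION & SPEC =====
def Spec_solve (Anum : Int) (Lnum : Int) (out : Int × Int) : Prop := out = solve_alt Anum Lnum
instance (Anum : Int) (Lnum : Int) (out : Int × Int) : Decidable (Spec_solve Anum Lnum out) := by unfold Spec_solve; infer_instance

-- ===== CLAIM (what is proved, stated in full; the proofs are below) =====
def Claim_equal_solve : Prop := ∀ (Anum : Int) (Lnum : Int), Dom_solve Anum Lnum → Spec_solve Anum Lnum (solve Anum Lnum)

-- ===== LEMMAS AND PROOFS =====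

-- the loop adds k = max 0 ⌈(L - 2c)/2⌉ to cowNum and subtracts it from cknNum
theorem solveLoop_closed (cow ckn L : Int) :
    solveLoop cow ckn L =
      (cow + max 0 (PySem.Int.floordiv (L - 2 * ckn + 1) 2),
       ckn - max 0 (PySem.Int.floordiv (L - 2 * ckn + 1) 2)) := by
  rw [solveLoop]
  split
  · rename_i h
    rw [solveLoop_closed (cow + 1) (ckn - 1) (L - 4)]
    have e1 : L - 4 - 2 * (ckn - 1) + 1 = L - 2 * ckn + 1 - 2 := by ring
    rw [e1]
    rw [PySem.Int.floordiv_eq_ediv_of_pos (by omega),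
        PySem.Int.floordiv_eq_ediv_of_pos (by omega)]
    simp only [Prod.mk.injEq]
    omega
  · rename_i h
    rw [PySem.Int.floordiv_eq_ediv_of_pos (by omega)]
    simp only [Prod.mk.injEq]
    omega
termination_by (L - 2 * ckn).toNat
decreasing_by omega

-- ===== VERDICT (by name: the statement is the Claim_ definition above) =====
theorem solve_spec : Claim_equal_solve := by
  intro Anum Lnum _
  unfold Spec_solve solve solve_alt
  rw [solveLoop_closed]
  simp
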